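-- pv_equiv track=rewrite | github.com/dianedef/contentflow_lab | agents/seo/tools/dataforseo_provider.py | _analyze_title_patterns
-- ===== SOURCE A (Python) =====
-- from typing import Any, Dict, List, Optional
--
-- def _analyze_title_patterns(titles: List[str]) -> List[str]:
--     patterns = []
--     if any("how to" in t.lower() for t in titles):
--         patterns.append("How-to format common")
--     if any(any(c.isdigit() for c in t) for t in titles):
--         patterns.append("Numbered lists/statistics present")
--     if any("best" in t.lower() or "top" in t.lower() for t in titles):
--         patterns.append("Superlative rankings common")
--     if any("guide" in t.lower() for t in titles):
--         patterns.append("Comprehensive guides favored")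
--     if not patterns:
--         patterns.append("Standard informational titles")
--     return patterns
-- ===== SOURCE B (Python) =====
-- def _analyze_title_patterns(titles):
--     how_to = has_digit = superlative = guide = False
--     for t in titles:
--         low = t.lower()
--         how_to = how_to or "how to" in low
--         has_digit = has_digit or any(c.isdigit() for c in t)
--         superlative = superlative or "best" in low or "top" in low
--         guide = guide or "guide" in low
--     patterns = []
--     if how_to:
--         patterns.append("How-to format common")
--     if has_digit:
--         patterns.append("Numbered lists/statistics present")
--     if superlative:
--         patterns.append("Superlative rankings common")
--     if guide:
--         patterns.append("Comprehensive guides favored")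
--     if not patterns:
--         patterns.append("Standard informational titles")
--     return patterns
-- ===== Notes on version B (the rewrite author's own statement) =====
-- stated objective: alternative
-- what changed: Replaces four separate any()-scans (each re-lowercasing every title) with a single pass over titles that lowercases each title once and OR-accumulates four boolean flags, then emits the pattern strings from the flags.
import Mathlib
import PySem

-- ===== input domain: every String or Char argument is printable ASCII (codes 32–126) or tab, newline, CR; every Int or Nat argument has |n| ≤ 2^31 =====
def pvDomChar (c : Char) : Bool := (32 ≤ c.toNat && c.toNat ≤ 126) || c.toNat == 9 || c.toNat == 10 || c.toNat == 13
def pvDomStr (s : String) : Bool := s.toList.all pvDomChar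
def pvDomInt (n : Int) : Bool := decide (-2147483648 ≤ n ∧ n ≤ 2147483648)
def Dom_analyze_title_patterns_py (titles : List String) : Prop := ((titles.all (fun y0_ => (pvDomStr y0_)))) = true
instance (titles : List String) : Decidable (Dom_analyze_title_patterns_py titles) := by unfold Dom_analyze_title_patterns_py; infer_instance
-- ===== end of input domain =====

-- B replaces A's four separate any()-scans with one pass over the titles that
-- lowercases each title once and OR-accumulates four boolean flags (alternative decomposition).


-- ===== PORT A =====
def analyze_title_patterns_py (titles : List String) : List String :=
  let patterns : List String := []
  let patterns := if titles.any (fun t => PySem.Str.isIn "how to" (PySem.Str.lower t))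
                  then patterns ++ ["How-to format common"] else patterns
  let patterns := if titles.any (fun t => t.toList.any (fun c => PySem.Chars.isdigit c))
                  then patterns ++ ["Numbered lists/statistics present"] else patterns
  let patterns := if titles.any (fun t => PySem.Str.isIn "best" (PySem.Str.lower t) || PySem.Str.isIn "top" (PySem.Str.lower t))
                  then patterns ++ ["Superlative rankings common"] else patterns
  let patterns := if titles.any (fun t => PySem.Str.isIn "guide" (PySem.Str.lower t))
                  then patterns ++ ["Comprehensive guides favored"] else patterns
  let patterns := if patterns.isEmpty then patterns ++ ["Standard informational titles"] else patterns
  patterns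

-- ===== PORT B =====
def analyze_title_patterns_py_alt (titles : List String) : List String :=
  let flags := titles.foldl
    (fun (fl : Bool × Bool × Bool × Bool) t =>
      let low := PySem.Str.lower t
      (fl.1 || PySem.Str.isIn "how to" low,
       fl.2.1 || t.toList.any (fun c => PySem.Chars.isdigit c),
       fl.2.2.1 || PySem.Str.isIn "best" low || PySem.Str.isIn "top" low,
       fl.2.2.2 || PySem.Str.isIn "guide" low))
    (false, false, false, false)
  let patterns : List String := []
  let patterns := if flags.1 then patterns ++ ["How-to format common"] else patterns
  let patterns := if flags.2.1 then patterns ++ ["Numbered lists/statistics present"] else patterns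
  let patterns := if flags.2.2.1 then patterns ++ ["Superlative rankings common"] else patterns
  let patterns := if flags.2.2.2 then patterns ++ ["Comprehensive guides favored"] else patterns
  if patterns.isEmpty then patterns ++ ["Standard informational titles"] else patterns

-- ===== PRECONDITION & SPEC =====
def Spec_analyze_title_patterns_py (titles : List String) (out : List String) : Prop := out = analyze_title_patterns_py_alt titles
instance (titles : List String) (out : List String) : Decidable (Spec_analyze_title_patterns_py titles out) := by unfold Spec_analyze_title_patterns_py; infer_instance

-- ===== CLAIM (what is proved, stated in full; the proofs are below) =====
def Claim_equal_analyze_title_patterns_py : Prop := ∀ (titles : List String), Dom_analyze_title_patterns_py titles → Spec_analyze_title_patterns_py titles (analyze_title_patterns_py titles)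

-- ===== LEMMAS AND PROOFS =====

-- B's OR-accumulating fold computes exactly the four any-scans of A.
theorem foldl_flags_eq (titles : List String) (a b c d : Bool) :
    titles.foldl
      (fun (fl : Bool × Bool × Bool × Bool) t =>
        let low := PySem.Str.lower t
        (fl.1 || PySem.Str.isIn "how to" low,
         fl.2.1 || t.toList.any (fun ch => PySem.Chars.isdigit ch),
         fl.2.2.1 || PySem.Str.isIn "best" low || PySem.Str.isIn "top" low,
         fl.2.2.2 || PySem.Str.isIn "guide" low))
      (a, b, c, d)
    = (a || titles.any (fun t => PySem.Str.isIn "how to" (PySem.Str.lower t)),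
       b || titles.any (fun t => t.toList.any (fun ch => PySem.Chars.isdigit ch)),
       c || titles.any (fun t => PySem.Str.isIn "best" (PySem.Str.lower t) || PySem.Str.isIn "top" (PySem.Str.lower t)),
       d || titles.any (fun t => PySem.Str.isIn "guide" (PySem.Str.lower t))) := by
  induction titles generalizing a b c d with
  | nil => simp
  | cons t ts ih =>
    simp only [List.foldl_cons, List.any_cons, ih]
    simp [Bool.or_assoc]

-- ===== VERDICT (by name: the statement is the Claim_ definition above) =====
theorem analyze_title_patterns_py_spec : Claim_equal_analyze_title_patterns_py := by
  intro titles _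
  show analyze_title_patterns_py titles = analyze_title_patterns_py_alt titles
  unfold analyze_title_patterns_py analyze_title_patterns_py_alt
  rw [foldl_flags_eq]
  cases titles.any (fun t => PySem.Str.isIn "how to" (PySem.Str.lower t)) <;>
  cases titles.any (fun t => t.toList.any (fun ch => PySem.Chars.isdigit ch)) <;>
  cases titles.any (fun t => PySem.Str.isIn "best" (PySem.Str.lower t) || PySem.Str.isIn "top" (PySem.Str.lower t)) <;>
  cases titles.any (fun t => PySem.Str.isIn "guide" (PySem.Str.lower t)) <;> rfl
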